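-- pv_equiv track=rewrite | github.com/N8Hawes75/JetCat_Comms | help_cw.py | byte_unstuffing
-- ===== SOURCE A (Python) =====
-- def byte_unstuffing(byte_array):
--     """
--     byte_unstuffing takes the byte_array and decodes any stuffing that might
--     have happened.
--     """
--     # TODO: Test this function. If it does not work, engine data will become
--     # corrupted.
--
--     for i in range(len(byte_array)-1):
--
--         # "If 0x7D should be transmitted, transmit two bytes: 0x7D and 0x5D"
--         # This is from JetCat documentation
--         if(byte_array[i]==0x7D and byte_array[i+1]==0x5D):
--             # Delete the extra byte
--             del byte_array[i+1]
--             # Append so that byte_array does not lose length. Code will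
--             # fail if this is not done.
--             byte_array.append(0x00)
--
--
--         # "If 0x7E should be transmitted, transmit two bytes: 0x7D and 0x5E"
--         # This is from JetCat documentation
--         if(byte_array[i]==0x7D and byte_array[i+1]==0x5E):
--             # Replace two bytes with 0x7E
--             byte_array[i] = 0x7E
--             del byte_array[i+1]
--             byte_array.append(0x00)
--
--
--     return byte_array
-- ===== SOURCE B (Python) =====
-- def byte_unstuffing(byte_array):
--     """
--     Decode in one forward pass: jump straight to each 0x7D escape byte with
--     list.index, slice-copy the unescaped chunk before it, decode the escape,
--     and finally pad with zeros to the original length.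
--     Note: unlike the original, this does not mutate its argument; the claim
--     is about the return value only.
--     """
--     out = []
--     i, n = 0, len(byte_array)
--     while True:
--         try:
--             j = byte_array.index(0x7D, i)
--         except ValueError:
--             out.extend(byte_array[i:])
--             break
--         out.extend(byte_array[i:j])
--         if j + 1 < n and byte_array[j + 1] == 0x5D:
--             out.append(0x7D)
--             i = j + 2
--         elif j + 1 < n and byte_array[j + 1] == 0x5E:
--             out.append(0x7E)
--             i = j + 2
--         else:
--             out.append(0x7D)
--             i = j + 1
--     out.extend([0] * (n - len(out)))
--     return out
-- ===== Notes on version B (the rewrite author's own statement) =====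
-- stated objective: alternative
-- what changed: A repeatedly deletes from and appends to the list in place inside a fixed index loop (each del shifts the whole tail); B never mutates: it jumps to each 0x7D escape with list.index, slice-copies the unescaped chunk before it into a fresh output list, decodes the escape, and pads with zeros at the end.
-- intended difference: On inputs containing the three consecutive bytes 0x7D 0x5D 0x5E, A re-checks the shifted successor inside the same loop iteration and fuses the escape pair 0x7D 0x5D and the following plain byte 0x5E into a single 0x7E, while B decodes them to the two bytes 0x7D and 0x5E, which is what the JetCat byte-stuffing rule intends. — e.g. on byte_unstuffing([125, 93, 94]): A returns [126, 0, 0], B returns [125, 94, 0]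
import Mathlib
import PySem

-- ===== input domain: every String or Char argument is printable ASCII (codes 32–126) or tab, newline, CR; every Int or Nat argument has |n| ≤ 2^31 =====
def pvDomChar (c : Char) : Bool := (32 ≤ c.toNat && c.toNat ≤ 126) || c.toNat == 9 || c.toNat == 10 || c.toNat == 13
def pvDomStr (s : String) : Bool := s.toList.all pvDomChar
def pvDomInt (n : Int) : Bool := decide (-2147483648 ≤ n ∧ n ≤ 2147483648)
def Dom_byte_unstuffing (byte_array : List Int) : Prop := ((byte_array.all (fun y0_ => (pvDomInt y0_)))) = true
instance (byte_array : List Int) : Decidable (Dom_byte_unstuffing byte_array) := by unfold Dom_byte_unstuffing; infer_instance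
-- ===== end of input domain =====

-- B replaces A's in-place delete/append loop by a single forward scan that
-- emits decoded bytes and pads with zeros (alternative; A mutates its argument
-- in place and returns it, B returns a fresh list — the claim is about the
-- return value only).

-- ===== PORT A =====
-- one iteration of A's for-body at index i on the current array
def stepA (a : List Int) (i : Nat) : List Int :=
  let a1 := if a[i]? = some 125 ∧ a[i+1]? = some 93 then a.eraseIdx (i+1) ++ [0] else a
  if a1[i]? = some 125 ∧ a1[i+1]? = some 94 then (a1.set i 126).eraseIdx (i+1) ++ [0] else a1

def byte_unstuffing (byte_array : List Int) : List Int :=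
  (List.range (byte_array.length - 1)).foldl stepA byte_array

-- ===== PORT B =====
-- B's while-loop: `byte_array.index(0x7D, i)` plus the slice copy of the chunk
-- before it become a takeWhile/dropWhile split of the remaining suffix at the
-- first 0x7D; each iteration decodes one escape (ValueError branch = no 0x7D left)
def scanB2 (l : List Int) : List Int :=
  match h : l.dropWhile (· ≠ 125) with
  | [] => l.takeWhile (· ≠ 125)
  | _ :: rest =>
    match rest with
    | 93 :: r => l.takeWhile (· ≠ 125) ++ 125 :: scanB2 r
    | 94 :: r => l.takeWhile (· ≠ 125) ++ 126 :: scanB2 r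
    | _ => l.takeWhile (· ≠ 125) ++ 125 :: scanB2 rest
termination_by l.length
decreasing_by
  · have hl := congrArg List.length (List.takeWhile_append_dropWhile (p := (· ≠ 125)) (l := l))
    rw [h] at hl
    simp only [List.length_append, List.length_cons] at hl
    omega
  · have hl := congrArg List.length (List.takeWhile_append_dropWhile (p := (· ≠ 125)) (l := l))
    rw [h] at hl
    simp only [List.length_append, List.length_cons] at hl
    omega
  · rename_i hd hstar xs
    have hl := congrArg List.length (List.takeWhile_append_dropWhile (p := (· ≠ 125)) (l := l))
    rw [hstar] at hl
    simp only [List.length_append, List.length_cons] at hl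
    omega

def byte_unstuffing_alt (byte_array : List Int) : List Int :=
  let out := scanB2 byte_array
  out ++ List.replicate (byte_array.length - out.length) 0

-- ===== PRECONDITION & SPEC =====
-- On inputs containing the byte pattern 0x7D 0x5D 0x5E, A re-checks the shifted
-- successor inside the same iteration and wrongly fuses the escape pair 7D 5D and
-- the following plain byte 5E into a single 0x7E; B decodes them to 0x7D, 0x5E as
-- the JetCat stuffing rule intends.
def D_byte_unstuffing (byte_array : List Int) : Prop :=
  [125, 93, 94] <:+: byte_array
instance (byte_array : List Int) : Decidable (D_byte_unstuffing byte_array) := by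
  unfold D_byte_unstuffing; infer_instance

def Spec_byte_unstuffing (byte_array : List Int) (out : List Int) : Prop :=
  ¬ D_byte_unstuffing byte_array → out = byte_unstuffing_alt byte_array
instance (byte_array : List Int) (out : List Int) : Decidable (Spec_byte_unstuffing byte_array out) := by
  unfold Spec_byte_unstuffing; infer_instance

def pvDiffWitness_byte_unstuffing : List Int := [125, 93, 94]
def pvDiffWitnessOut_byte_unstuffing : (List Int) × (List Int) := ([126, 0, 0], [125, 94, 0])

-- ===== CLAIM (what is proved, stated in full; the proofs are below) =====
def Claim_unchanged_byte_unstuffing : Prop := ∀ (byte_array : List Int), Dom_byte_unstuffing byte_array → Spec_byte_unstuffing byte_array (byte_unstuffing byte_array)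
def Claim_changed_byte_unstuffing : Prop := Dom_byte_unstuffing (pvDiffWitness_byte_unstuffing) ∧ D_byte_unstuffing (pvDiffWitness_byte_unstuffing) ∧ byte_unstuffing (pvDiffWitness_byte_unstuffing) = pvDiffWitnessOut_byte_unstuffing.1 ∧ byte_unstuffing_alt (pvDiffWitness_byte_unstuffing) = pvDiffWitnessOut_byte_unstuffing.2 ∧ pvDiffWitnessOut_byte_unstuffing.1 ≠ pvDiffWitnessOut_byte_unstuffing.2
def Claim_exact_byte_unstuffing : Prop := ∀ (byte_array : List Int), Dom_byte_unstuffing byte_array → D_byte_unstuffing byte_array → byte_unstuffing byte_array ≠ byte_unstuffing_alt byte_array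

-- ===== LEMMAS AND PROOFS =====

def scanB : List Int → List Int
  | [] => []
  | [x] => [x]
  | x :: y :: rest =>
    if x = 125 ∧ y = 93 then 125 :: scanB rest
    else if x = 125 ∧ y = 94 then 126 :: scanB rest
    else x :: scanB (y :: rest)
termination_by l => l.length

-- unfolding equations for scanB2 (one per shape of the dropWhile split)
theorem scanB2_eq_nil (l : List Int) (h : l.dropWhile (· ≠ 125) = []) :
    scanB2 l = l.takeWhile (· ≠ 125) := by
  rw [scanB2.eq_def]
  split
  · rfl
  · rename_i heq
    simp only [h] at heq
    cases heq

theorem scanB2_eq_93 (l : List Int) (x : Int) (r : List Int)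
    (h : l.dropWhile (· ≠ 125) = x :: 93 :: r) :
    scanB2 l = l.takeWhile (· ≠ 125) ++ 125 :: scanB2 r := by
  rw [scanB2.eq_def]
  split
  · rename_i heq; simp only [h] at heq; cases heq
  · rename_i hd rst heq
    rw [h] at heq
    injection heq with h1 h2
    subst h2
    rfl

theorem scanB2_eq_94 (l : List Int) (x : Int) (r : List Int)
    (h : l.dropWhile (· ≠ 125) = x :: 94 :: r) :
    scanB2 l = l.takeWhile (· ≠ 125) ++ 126 :: scanB2 r := by
  rw [scanB2.eq_def]
  split
  · rename_i heq; simp only [h] at heq; cases heq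
  · rename_i hd rst heq
    rw [h] at heq
    injection heq with h1 h2
    subst h2
    rfl

theorem scanB2_eq_other (l : List Int) (x : Int) (rest : List Int)
    (h : l.dropWhile (· ≠ 125) = x :: rest)
    (h93 : ∀ r, rest ≠ 93 :: r) (h94 : ∀ r, rest ≠ 94 :: r) :
    scanB2 l = l.takeWhile (· ≠ 125) ++ 125 :: scanB2 rest := by
  rw [scanB2.eq_def]
  split
  · rename_i heq; simp only [h] at heq; cases heq
  · rename_i hd rst heq
    rw [h] at heq
    injection heq with h1 h2
    subst h2
    cases rest with
    | nil => rfl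
    | cons w r =>
      split
      · rename_i hl2 hh
        exact absurd hl2 (h93 _)
      · rename_i hl2 hh
        exact absurd hl2 (h94 _)
      · rfl

-- a non-escape head passes through B's chunked scan
theorem scanB2_cons_ne (x : Int) (t : List Int) (hx : x ≠ 125) :
    scanB2 (x :: t) = x :: scanB2 t := by
  have hd : (x :: t).dropWhile (· ≠ 125) = t.dropWhile (· ≠ 125) := by
    simp [hx]
  have htk : (x :: t).takeWhile (· ≠ 125) = x :: t.takeWhile (· ≠ 125) := by
    simp [hx]
  cases hdw : t.dropWhile (· ≠ 125) with
  | nil =>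
    rw [scanB2_eq_nil _ (hd.trans hdw), scanB2_eq_nil _ hdw, htk]
  | cons z rest =>
    cases rest with
    | nil =>
      rw [scanB2_eq_other _ z [] (hd.trans hdw) (by simp) (by simp),
        scanB2_eq_other _ z [] hdw (by simp) (by simp), htk]
      simp
    | cons w r =>
      by_cases hw93 : w = 93
      · subst hw93
        rw [scanB2_eq_93 _ z r (hd.trans hdw), scanB2_eq_93 _ z r hdw, htk]
        simp
      · by_cases hw94 : w = 94
        · subst hw94
          rw [scanB2_eq_94 _ z r (hd.trans hdw), scanB2_eq_94 _ z r hdw, htk]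
          simp
        · have h93 : ∀ r', w :: r ≠ 93 :: r' := fun r' hc => hw93 (List.cons.inj hc).1
          have h94 : ∀ r', w :: r ≠ 94 :: r' := fun r' hc => hw94 (List.cons.inj hc).1
          rw [scanB2_eq_other _ z (w :: r) (hd.trans hdw) h93 h94,
            scanB2_eq_other _ z (w :: r) hdw h93 h94, htk]
          simp

-- B's chunked scan equals the byte-at-a-time scan
theorem scanB2_eq_scanB : ∀ n (l : List Int), l.length = n → scanB2 l = scanB l := by
  intro n
  induction n using Nat.strong_induction_on with
  | _ n ih =>
  intro l hlen
  cases l with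
  | nil =>
    rw [scanB2_eq_nil [] (by simp)]
    simp [scanB]
  | cons x t =>
    by_cases hx : x = 125
    · subst hx
      have hd : ((125:Int) :: t).dropWhile (· ≠ 125) = 125 :: t := by
        simp
      cases t with
      | nil =>
        rw [scanB2_eq_other _ 125 [] hd (by simp) (by simp), scanB2_eq_nil [] (by simp)]
        simp [scanB]
      | cons y r =>
        by_cases hy93 : y = 93
        · subst hy93
          rw [scanB2_eq_93 _ 125 r hd, ih r.length (by simp [← hlen]) r rfl]
          rw [show scanB ((125:Int) :: 93 :: r) = 125 :: scanB r by rw [scanB]; simp]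
          simp
        · by_cases hy94 : y = 94
          · subst hy94
            rw [scanB2_eq_94 _ 125 r hd, ih r.length (by simp [← hlen]) r rfl]
            rw [show scanB ((125:Int) :: 94 :: r) = 126 :: scanB r by rw [scanB]; simp]
            simp
          · have h93 : ∀ r', y :: r ≠ 93 :: r' := by
              intro r' hc; injection hc with hw _; exact hy93 hw
            have h94 : ∀ r', y :: r ≠ 94 :: r' := by
              intro r' hc; injection hc with hw _; exact hy94 hw
            rw [scanB2_eq_other _ 125 (y :: r) hd h93 h94,
              ih (y :: r).length (by simp [← hlen]) (y :: r) rfl]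
            rw [show scanB ((125:Int) :: y :: r) = 125 :: scanB (y :: r) by
              rw [scanB]; simp [hy93, hy94]]
            simp
    · rw [scanB2_cons_ne x t hx, ih t.length (by simp [← hlen]) t rfl]
      cases t with
      | nil => simp [scanB]
      | cons y r =>
        rw [show scanB (x :: y :: r) = x :: scanB (y :: r) by rw [scanB]; simp [hx]]


-- the loop body commutes with an untouched head
theorem stepA_cons (x : Int) (a : List Int) (i : Nat) :
    stepA (x :: a) (i + 1) = x :: stepA a i := by
  unfold stepA
  simp only [List.getElem?_cons_succ, List.eraseIdx_cons_succ, List.cons_append]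
  by_cases h1 : a[i]? = some 125 ∧ a[i+1]? = some 93
  · simp only [h1]
    by_cases h2 : (a.eraseIdx (i+1) ++ [0])[i]? = some 125 ∧ (a.eraseIdx (i+1) ++ [0])[i+1]? = some 94
    · simp [h2, List.set_cons_succ]
    · simp [h2]
  · simp only [h1, if_false]
    by_cases h2 : a[i]? = some 125 ∧ a[i+1]? = some 94
    · simp [h2, List.set_cons_succ]
    · simp [h2]

def loopA (m : Nat) (a : List Int) : List Int := (List.range m).foldl stepA a

theorem loopA_cons (m : Nat) (x : Int) (a : List Int) :
    (List.foldl (fun b i => stepA b (i + 1)) (x :: a) (List.range m)) = x :: loopA m a := by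
  unfold loopA
  induction m using Nat.rec generalizing a with
  | zero => simp
  | succ m ih => simp [List.range_succ, List.foldl_append, ih, stepA_cons]

theorem loopA_succ_peel (m : Nat) (x : Int) (a : List Int) :
    loopA (m + 1) (x :: a) = (List.range m).foldl (fun b i => stepA b (i + 1)) (stepA (x :: a) 0) := by
  unfold loopA
  rw [List.range_succ_eq_map]
  simp [List.foldl_map]

theorem loopA_zeros (m k : Nat) : loopA m (List.replicate k 0) = List.replicate k 0 := by
  induction m with
  | zero => rfl
  | succ m ih =>
    unfold loopA at *
    rw [List.range_succ, List.foldl_append]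
    simp only [List.foldl_cons, List.foldl_nil, ih]
    unfold stepA
    have h : ∀ j : Nat, (List.replicate k (0:Int))[j]? ≠ some 125 := by
      intro j
      by_cases hj : j < k <;> simp [hj]
    simp [h]

-- behaviour of A's body at index 0 on each head shape
theorem step0_93 (u : List Int) (hu : (u ++ [0])[0]? ≠ some 94) :
    stepA (125 :: 93 :: u) 0 = 125 :: (u ++ [0]) := by
  unfold stepA
  simp [List.eraseIdx]
  intro h
  exact absurd (by rw [List.getElem?_eq_getElem (by simp), h]) hu

theorem step0_94 (u : List Int) :
    stepA (125 :: 94 :: u) 0 = 126 :: (u ++ [0]) := by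
  unfold stepA
  simp [List.eraseIdx]

theorem step0_triple (u : List Int) :
    stepA (125 :: 93 :: 94 :: u) 0 = 126 :: (u ++ [0] ++ [0]) := by
  unfold stepA
  simp [List.eraseIdx]

theorem step0_other (x : Int) (u : List Int)
    (h1 : ¬ (x = 125 ∧ u[0]? = some 93)) (h2 : ¬ (x = 125 ∧ u[0]? = some 94)) :
    stepA (x :: u) 0 = x :: u := by
  unfold stepA
  by_cases hx : x = 125
  · simp [hx] at h1 h2
    simp [hx, h1, h2]
  · simp [hx]

theorem head_append_zero_94 (u : List Int) (k : Nat) (h : ¬ ∃ r, u = 94 :: r) :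
    ((u ++ List.replicate k 0) ++ [0])[0]? ≠ some 94 := by
  cases u with
  | nil =>
    cases k with
    | zero => simp
    | succ k => simp [List.replicate_succ]
  | cons y u' =>
    simp only [List.cons_append, List.getElem?_cons_zero, ne_eq, Option.some.injEq]
    intro hy
    exact h ⟨u', by rw [hy]⟩

theorem rep_succ_snoc (k : Nat) :
    (List.replicate k (0:Int)) ++ [0] = List.replicate (k+1) 0 := by
  simp [List.replicate_succ']

-- infix facts
theorem not_infix_tail {x : Int} {a : List Int} (h : ¬ [125, 93, 94] <:+: (x :: a)) :
    ¬ [125, 93, 94] <:+: a := fun hi => h (hi.trans (List.suffix_cons x a).isInfix)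

theorem infix_of_cons {x : Int} {a : List Int} (h : [125, 93, 94] <:+: (x :: a))
    (hx : ¬ ∃ r, a = 93 :: 94 :: r ∧ x = 125) : [125, 93, 94] <:+: a := by
  rcases h with ⟨s, t, hst⟩
  cases s with
  | nil =>
    simp only [List.nil_append, List.cons_append] at hst
    cases hst
    exact absurd ⟨t, rfl, rfl⟩ hx
  | cons y s' =>
    simp only [List.cons_append] at hst
    cases hst
    exact ⟨s', t, rfl⟩

-- the heart: running A's loop on a ++ 0^k equals B's scan padded with zeros,
-- when a does not contain the pattern (count: |a| + k - 1 iterations)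
theorem main_eq : ∀ n (a : List Int) (k : Nat), a.length = n →
    ¬ [125, 93, 94] <:+: a →
    loopA (a.length + k - 1) (a ++ List.replicate k 0)
      = scanB a ++ List.replicate (a.length + k - (scanB a).length) 0 := by
  intro n
  induction n using Nat.strong_induction_on with
  | _ n ih =>
  intro a k hlen hnp
  cases a with
  | nil => simp [scanB, loopA_zeros]
  | cons x rest =>
  cases rest with
  | nil =>
    -- a = [x]
    cases k with
    | zero => simp [scanB, loopA]
    | succ k' =>
      have hT : ([x] : List Int).length + (k'+1) - 1 = k' + 1 := by simp
      have hs : stepA (x :: List.replicate (k'+1) 0) 0 = x :: List.replicate (k'+1) 0 := by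
        apply step0_other <;> simp [List.replicate_succ]
      rw [show ([x] : List Int) ++ List.replicate (k'+1) 0 = x :: List.replicate (k'+1) 0 by simp,
        hT, loopA_succ_peel, hs, loopA_cons, loopA_zeros]
      simp [scanB, List.replicate_succ]
  | cons y r =>
    by_cases h93 : x = 125 ∧ y = 93
    · -- escape pair 7D 5D; the following byte is not 5E (¬D_)
      obtain ⟨hx, hy⟩ := h93
      subst hx; subst hy
      have hr94 : ¬ ∃ r', r = 94 :: r' := by
        rintro ⟨r', rfl⟩
        exact hnp ⟨[], r', rfl⟩
      have hT : ((125:Int) :: 93 :: r).length + k - 1 = (r.length + k) + 1 := by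
        simp; omega
      have hs : stepA ((125 : Int) :: 93 :: (r ++ List.replicate k 0)) 0
          = 125 :: ((r ++ List.replicate k 0) ++ [0]) := by
        exact step0_93 _ (head_append_zero_94 r k hr94)
      rw [show ((125:Int) :: 93 :: r) ++ List.replicate k 0
            = 125 :: 93 :: (r ++ List.replicate k 0) by simp, hT, loopA_succ_peel, hs]
      rw [show ((r ++ List.replicate k 0) ++ [0]) = r ++ List.replicate (k+1) 0 by
            rw [List.append_assoc, rep_succ_snoc], loopA_cons]
      have hnr : ¬ [125, 93, 94] <:+: r :=
        not_infix_tail (not_infix_tail hnp)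
      have := ih r.length (by simp [← hlen]) r (k+1) rfl hnr
      rw [show r.length + k = r.length + (k+1) - 1 by omega, this]
      rw [show scanB ((125:Int) :: 93 :: r) = 125 :: scanB r by rw [scanB]; simp]
      simp only [List.cons_append, List.length_cons]
      congr 3
      omega
    · by_cases h94 : x = 125 ∧ y = 94
      · -- escape pair 7D 5E
        obtain ⟨hx, hy⟩ := h94
        subst hx; subst hy
        have hT : ((125:Int) :: 94 :: r).length + k - 1 = (r.length + k) + 1 := by
          simp; omega
        rw [show ((125:Int) :: 94 :: r) ++ List.replicate k 0
              = 125 :: 94 :: (r ++ List.replicate k 0) by simp, hT, loopA_succ_peel, step0_94]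
        rw [show ((r ++ List.replicate k 0) ++ [0]) = r ++ List.replicate (k+1) 0 by
              rw [List.append_assoc, rep_succ_snoc], loopA_cons]
        have hnr : ¬ [125, 93, 94] <:+: r :=
          not_infix_tail (not_infix_tail hnp)
        have := ih r.length (by simp [← hlen]) r (k+1) rfl hnr
        rw [show r.length + k = r.length + (k+1) - 1 by omega, this]
        rw [show scanB ((125:Int) :: 94 :: r) = 126 :: scanB r by rw [scanB]; simp]
        simp only [List.cons_append, List.length_cons]
        congr 3
        omega
      · -- plain byte at the head
        have hT : (x :: y :: r).length + k - 1 = ((y :: r).length + k - 1) + 1 := by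
          simp; omega
        have hs : stepA (x :: ((y :: r) ++ List.replicate k 0)) 0
            = x :: ((y :: r) ++ List.replicate k 0) := by
          apply step0_other <;> simp <;> intro hx hy <;>
            [exact h93 ⟨hx, hy⟩; exact h94 ⟨hx, hy⟩]
        rw [show (x :: y :: r) ++ List.replicate k 0
              = x :: ((y :: r) ++ List.replicate k 0) by simp, hT, loopA_succ_peel, hs, loopA_cons]
        have hnr : ¬ [125, 93, 94] <:+: (y :: r) := not_infix_tail hnp
        have := ih (y :: r).length (by simp [← hlen]) (y :: r) k rfl hnr
        rw [this]
        rw [show scanB (x :: y :: r) = x :: scanB (y :: r) by rw [scanB]; simp [h93, h94]]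
        simp only [List.cons_append, List.length_cons]
        congr 3
        omega

-- inside D_: A's loop result differs from B's padded scan
theorem main_ne : ∀ n (a : List Int) (k : Nat), a.length = n →
    [125, 93, 94] <:+: a →
    loopA (a.length + k - 1) (a ++ List.replicate k 0)
      ≠ scanB a ++ List.replicate (a.length + k - (scanB a).length) 0 := by
  intro n
  induction n using Nat.strong_induction_on with
  | _ n ih =>
  intro a k hlen hp
  cases a with
  | nil => exact absurd hp.length_le (by simp)
  | cons x rest =>
  cases rest with
  | nil => exact absurd hp.length_le (by simp)
  | cons y r =>
    by_cases h93 : x = 125 ∧ y = 93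
    · obtain ⟨hx, hy⟩ := h93
      subst hx; subst hy
      by_cases htr : ∃ r', r = 94 :: r'
      · -- the divergence: A fuses 7D 5D 5E into 7E, B emits 7D then 5E
        obtain ⟨r', rfl⟩ := htr
        have hT : ((125:Int) :: 93 :: 94 :: r').length + k - 1 = (r'.length + k + 1) + 1 := by
          simp; omega
        rw [show ((125:Int) :: 93 :: 94 :: r') ++ List.replicate k 0
              = 125 :: 93 :: 94 :: (r' ++ List.replicate k 0) by simp, hT, loopA_succ_peel,
            step0_triple, loopA_cons]
        rw [show scanB ((125:Int) :: 93 :: 94 :: r') = 125 :: scanB (94 :: r') by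
              rw [scanB]; simp]
        intro h
        rw [List.cons_append] at h
        injection h with h1
        norm_num at h1
      · -- pair 7D 5D, pattern lies further right
        have hr94 : ¬ ∃ r', r = 94 :: r' := htr
        have hT : ((125:Int) :: 93 :: r).length + k - 1 = (r.length + k) + 1 := by
          simp; omega
        have hs : stepA ((125 : Int) :: 93 :: (r ++ List.replicate k 0)) 0
            = 125 :: ((r ++ List.replicate k 0) ++ [0]) := by
          exact step0_93 _ (head_append_zero_94 r k hr94)
        rw [show ((125:Int) :: 93 :: r) ++ List.replicate k 0
              = 125 :: 93 :: (r ++ List.replicate k 0) by simp, hT, loopA_succ_peel, hs]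
        rw [show ((r ++ List.replicate k 0) ++ [0]) = r ++ List.replicate (k+1) 0 by
              rw [List.append_assoc, rep_succ_snoc], loopA_cons]
        rw [show scanB ((125:Int) :: 93 :: r) = 125 :: scanB r by rw [scanB]; simp]
        have hpr : [125, 93, 94] <:+: r := by
          apply infix_of_cons (x := 93)
          · apply infix_of_cons (x := 125) hp
            rintro ⟨t, ht, -⟩
            exact hr94 ⟨t, (List.cons.inj ht).2⟩
          · rintro ⟨t, -, h⟩
            norm_num at h
        have hne := ih r.length (by simp [← hlen]) r (k+1) rfl hpr
        intro h
        rw [List.cons_append] at h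
        injection h with _ h'
        apply hne
        rw [show r.length + (k+1) - 1 = r.length + k by omega, h']
        simp only [List.length_cons]
        congr 2
        omega
    · by_cases h94 : x = 125 ∧ y = 94
      · obtain ⟨hx, hy⟩ := h94
        subst hx; subst hy
        have hT : ((125:Int) :: 94 :: r).length + k - 1 = (r.length + k) + 1 := by
          simp; omega
        rw [show ((125:Int) :: 94 :: r) ++ List.replicate k 0
              = 125 :: 94 :: (r ++ List.replicate k 0) by simp, hT, loopA_succ_peel, step0_94]
        rw [show ((r ++ List.replicate k 0) ++ [0]) = r ++ List.replicate (k+1) 0 by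
              rw [List.append_assoc, rep_succ_snoc], loopA_cons]
        rw [show scanB ((125:Int) :: 94 :: r) = 126 :: scanB r by rw [scanB]; simp]
        have hpr : [125, 93, 94] <:+: r := by
          apply infix_of_cons (x := 94)
          · apply infix_of_cons (x := 125) hp
            rintro ⟨t, ht, -⟩
            norm_num at ht
          · rintro ⟨t, -, h⟩
            norm_num at h
        have hne := ih r.length (by simp [← hlen]) r (k+1) rfl hpr
        intro h
        rw [List.cons_append] at h
        injection h with _ h'
        apply hne
        rw [show r.length + (k+1) - 1 = r.length + k by omega, h']
        simp only [List.length_cons]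
        congr 2
        omega
      · have hT : (x :: y :: r).length + k - 1 = ((y :: r).length + k - 1) + 1 := by
          simp; omega
        have hs : stepA (x :: ((y :: r) ++ List.replicate k 0)) 0
            = x :: ((y :: r) ++ List.replicate k 0) := by
          apply step0_other <;> simp <;> intro hx hy <;>
            [exact h93 ⟨hx, hy⟩; exact h94 ⟨hx, hy⟩]
        rw [show (x :: y :: r) ++ List.replicate k 0
              = x :: ((y :: r) ++ List.replicate k 0) by simp, hT, loopA_succ_peel, hs, loopA_cons]
        rw [show scanB (x :: y :: r) = x :: scanB (y :: r) by rw [scanB]; simp [h93, h94]]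
        have hpr : [125, 93, 94] <:+: (y :: r) := by
          apply infix_of_cons (x := x) hp
          rintro ⟨t, ht, hx⟩
          obtain ⟨hy, -⟩ := List.cons.inj ht
          exact h93 ⟨hx, hy⟩
        have hne := ih (y :: r).length (by simp [← hlen]) (y :: r) k rfl hpr
        intro h
        rw [List.cons_append] at h
        injection h with _ h'
        apply hne
        refine h'.trans ?_
        simp only [List.append_eq, List.length_cons]
        congr 2
        omega

theorem unstuffing_to_loop (a : List Int) :
    byte_unstuffing a = loopA (a.length + 0 - 1) (a ++ List.replicate 0 0) := by
  simp [byte_unstuffing, loopA]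

theorem alt_to_scan (a : List Int) :
    byte_unstuffing_alt a = scanB a ++ List.replicate (a.length + 0 - (scanB a).length) 0 := by
  simp [byte_unstuffing_alt, scanB2_eq_scanB a.length a rfl]

-- ===== VERDICT (by name: the statement is the Claim_ definition above) =====
theorem byte_unstuffing_spec : Claim_unchanged_byte_unstuffing := by
  intro a _ hD
  unfold D_byte_unstuffing at hD
  rw [unstuffing_to_loop, alt_to_scan]
  exact main_eq a.length a 0 rfl hD

theorem byte_unstuffing_changed : Claim_changed_byte_unstuffing := by
  unfold Claim_changed_byte_unstuffing
  refine ⟨by decide, by decide, by decide, ?_, by decide⟩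
  rw [show byte_unstuffing_alt pvDiffWitness_byte_unstuffing
        = scanB pvDiffWitness_byte_unstuffing
          ++ List.replicate (pvDiffWitness_byte_unstuffing.length
              - (scanB pvDiffWitness_byte_unstuffing).length) 0 by
      simp [byte_unstuffing_alt, scanB2_eq_scanB pvDiffWitness_byte_unstuffing.length _ rfl]]
  simp [pvDiffWitness_byte_unstuffing, pvDiffWitnessOut_byte_unstuffing, scanB]

theorem byte_unstuffing_tight : Claim_exact_byte_unstuffing := by
  intro a _ hD
  unfold D_byte_unstuffing at hD
  rw [unstuffing_to_loop, alt_to_scan]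
  exact main_ne a.length a 0 rfl hD
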